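-- pv_equiv track=rewrite | github.com/ManveerBasra/InstagramAnalytics | ig_access.py | _clean_list
-- ===== SOURCE A (Python) =====
-- from typing import List, Dict, Any
--
-- def _clean_list(raw_string: str) -> List[str]:
--     """
--     Returns a list of cleaned followers from list of followers and junk
--     """
--     return_list = []
--     raw_list = raw_string.split('\n')
--
--     # Loop through raw list of users and pick out users
--     for i in range(len(raw_list)):
--         # If the line is followed by a line containing Following or Follow, it's a username line
--         if i == 0 or raw_list[i-1] in ['Following', 'Follow']:
--             name = raw_list[i]
--             # Add a (Verified) tag if the account is verified
--             try:
--                 if raw_list[i+1] == 'Verified':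
--                     name += ' (Verified)'
--             except IndexError:  # Internet is slow and page isn't loading fully
--                 pass
--             return_list.append(name)
--
--     return return_list
-- ===== SOURCE B (Python) =====
-- def _clean_list(raw_string):
--     """
--     Returns a list of cleaned followers from list of followers and junk
--     """
--     return _gather(raw_string.split('\n'), True)
--
-- def _gather(lines, is_user):
--     # Structural recursion: consume the list head-first, threading whether the
--     # current head is a username (i.e. previous line was a marker / start).
--     if not lines:
--         return []
--     head, rest = lines[0], lines[1:]
--     tail = _gather(rest, head in ('Following', 'Follow'))
--     if not is_user:
--         return tail
--     if rest and rest[0] == 'Verified':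
--         return [head + ' (Verified)'] + tail
--     return [head] + tail
-- ===== Notes on version B (the rewrite author's own statement) =====
-- stated objective: alternative
-- what changed: B replaces A's index loop over range(len(raw_list)) with try/except IndexError by a head-first structural recursion on the line list that threads a boolean marker-seen flag and inspects only the head and the rest of the list, using no indices at all.
import Mathlib
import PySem

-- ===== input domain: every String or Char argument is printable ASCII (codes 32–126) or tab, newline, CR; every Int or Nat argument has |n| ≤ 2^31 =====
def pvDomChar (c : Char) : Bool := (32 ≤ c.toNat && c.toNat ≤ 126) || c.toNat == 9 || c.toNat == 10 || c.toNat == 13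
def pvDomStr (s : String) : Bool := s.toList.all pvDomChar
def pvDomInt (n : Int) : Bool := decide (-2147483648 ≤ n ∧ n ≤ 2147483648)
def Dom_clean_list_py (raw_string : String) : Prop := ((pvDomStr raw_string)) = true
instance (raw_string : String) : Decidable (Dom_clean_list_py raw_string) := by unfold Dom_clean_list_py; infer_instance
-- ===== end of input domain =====

-- B replaces A's index loop with try/except by a head-first structural recursion threading a
-- marker-seen flag (objective: alternative decomposition, same cost).

-- ===== PORT A =====
def clean_list_py (raw_string : String) : List String :=
  let raw_list := (PySem.Str.split? raw_string "\n").getD []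
  (PySem.List.pyRange 0 (raw_list.length : Int) 1).foldl (fun return_list i =>
    if i == 0 || (["Following", "Follow"] : List String).contains (PySem.List.pyGetD raw_list (i - 1) "") then
      let name := PySem.List.pyGetD raw_list i ""
      let name :=
        match PySem.List.pyGet? raw_list (i + 1) with
        | some nxt => if nxt == "Verified" then name ++ " (Verified)" else name
        | none => name   -- IndexError: pass
      return_list ++ [name]
    else return_list) []

-- ===== PORT B =====
-- _gather from Source B: head-first recursion, is_user says whether the head line is a username
def pvGather (lines : List String) (is_user : Bool) : List String :=
  match lines with
  | [] => []
  | head :: rest =>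
    let tail := pvGather rest ((["Following", "Follow"] : List String).contains head)
    if !is_user then tail
    else if (match rest with | r0 :: _ => r0 == "Verified" | [] => false) then
      (head ++ " (Verified)") :: tail
    else head :: tail

def clean_list_py_alt (raw_string : String) : List String :=
  pvGather ((PySem.Str.split? raw_string "\n").getD []) true

-- ===== PRECONDITION & SPEC =====
def Spec_clean_list_py (raw_string : String) (out : List String) : Prop := out = clean_list_py_alt raw_string
instance (raw_string : String) (out : List String) : Decidable (Spec_clean_list_py raw_string out) := by unfold Spec_clean_list_py; infer_instance

-- ===== CLAIM (what is proved, stated in full; the proofs are below) =====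
def Claim_equal_clean_list_py : Prop := ∀ (raw_string : String), Dom_clean_list_py raw_string → Spec_clean_list_py raw_string (clean_list_py raw_string)

-- ===== LEMMAS AND PROOFS =====

-- Nat-index forms of A's per-line test and formatter
def pvQ (xs : List String) (b : Bool) (k : Nat) : Bool :=
  if k = 0 then b else (["Following", "Follow"] : List String).contains (xs.getD (k - 1) "")

def pvF (xs : List String) (k : Nat) : String :=
  let name := xs.getD k ""
  if xs[k + 1]? == some "Verified" then name ++ " (Verified)" else name

theorem pv_A_eq (xs : List String) :
    (PySem.List.pyRange 0 (xs.length : Int) 1).foldl (fun return_list i =>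
      if i == 0 || (["Following", "Follow"] : List String).contains (PySem.List.pyGetD xs (i - 1) "") then
        let name := PySem.List.pyGetD xs i ""
        let name :=
          match PySem.List.pyGet? xs (i + 1) with
          | some nxt => if nxt == "Verified" then name ++ " (Verified)" else name
          | none => name
        return_list ++ [name]
      else return_list) []
    = ((List.range xs.length).filter (pvQ xs true)).map (pvF xs) := by
  have hA := PySem.List.foldl_append_if
    (fun i : Int => (i == 0 || (["Following", "Follow"] : List String).contains (PySem.List.pyGetD xs (i - 1) "")))
    (fun i : Int =>
      (let name := PySem.List.pyGetD xs i "";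
       match PySem.List.pyGet? xs (i + 1) with
       | some nxt => if nxt == "Verified" then name ++ " (Verified)" else name
       | none => name))
    (PySem.List.pyRange 0 (xs.length : Int) 1) ([] : List String)
  rw [hA, List.nil_append, PySem.List.pyRange_one, List.filter_map, List.map_map]
  have hlen : ((xs.length : Int) - 0).toNat = xs.length := by omega
  rw [hlen]
  have hfil : List.filter
      ((fun i : Int => (i == 0 || (["Following", "Follow"] : List String).contains (PySem.List.pyGetD xs (i - 1) ""))) ∘
        (fun k : Nat => (0 : Int) + k)) (List.range xs.length)
      = List.filter (pvQ xs true) (List.range xs.length) := by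
    apply List.filter_congr
    intro k _
    cases k with
    | zero => simp [pvQ]
    | succ m =>
      simp only [Function.comp, pvQ, zero_add]
      simp [PySem.List.pyGetD_natCast]
      intro h
      exact absurd h (by omega)
  rw [hfil]
  apply List.map_congr_left
  intro k _
  simp only [Function.comp, zero_add]
  have h2 : (k : Int) + 1 = ((k + 1 : Nat) : Int) := by push_cast; ring
  rw [h2, PySem.List.pyGet?_natCast]
  simp only [pvF, PySem.List.pyGetD_natCast]
  cases h : xs[k + 1]? with
  | none => simp
  | some v => by_cases hv : v = "Verified" <;> simp [hv]

theorem pv_B_eq : ∀ (xs : List String) (b : Bool),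
    ((List.range xs.length).filter (pvQ xs b)).map (pvF xs) = pvGather xs b := by
  intro xs
  induction xs with
  | nil => intro b; simp [pvGather]
  | cons x rest ih =>
    intro b
    have hQ : (pvQ (x :: rest) b) ∘ Nat.succ
        = pvQ rest ((["Following", "Follow"] : List String).contains x) := by
      funext k
      cases k with
      | zero => simp [pvQ]
      | succ m => simp [pvQ, Function.comp]
    have hF : (pvF (x :: rest)) ∘ Nat.succ = pvF rest := by
      funext k
      simp [pvF, Function.comp]
    have htail : (((List.range rest.length).map Nat.succ).filter (pvQ (x :: rest) b)).map (pvF (x :: rest))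
        = pvGather rest ((["Following", "Follow"] : List String).contains x) := by
      rw [List.filter_map, List.map_map, hQ, hF]
      exact ih _
    rw [List.length_cons, List.range_succ_eq_map, List.filter_cons]
    have hQ0 : pvQ (x :: rest) b 0 = b := by simp [pvQ]
    cases b with
    | false =>
      simp only [hQ0, Bool.false_eq_true, if_false]
      rw [htail]
      simp [pvGather]
    | true =>
      simp only [hQ0, if_true, List.map_cons]
      rw [htail]
      have hF0 : pvF (x :: rest) 0
          = if (match rest with | r0 :: _ => r0 == "Verified" | [] => false) then
              x ++ " (Verified)" else x := by
        cases rest with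
        | nil => simp [pvF]
        | cons r0 rs => simp [pvF]
      rw [hF0]
      cases rest with
      | nil => simp [pvGather]
      | cons r0 rs =>
        by_cases hv : r0 = "Verified" <;> simp [pvGather, hv]

-- ===== VERDICT (by name: the statement is the Claim_ definition above) =====
theorem clean_list_py_spec : Claim_equal_clean_list_py := by
  intro raw_string _
  unfold Spec_clean_list_py clean_list_py clean_list_py_alt
  rw [pv_A_eq, pv_B_eq]
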